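-- pv_equiv track=rewrite | github.com/sticky-ai/Algorithms | arcade/the_core/polygonPerimeter.py | polygonPerimeter
-- ===== SOURCE A (Python) =====
-- def polygonPerimeter(m):
--     # if a cell is true, count bordering cells that are False or out of bound as perimeter.
--     # only check cells immediately adjacent (not diagonal)
--
--     rb = len(m)
--     cb = len(m[0])
--     p = 0
--     for r in range(rb):
--         for c in range(cb):
--             if m[r][c]:
--                 p += bound_check(m,r-1,c,rb,cb) # up
--                 p += bound_check(m,r,c+1,rb,cb) # down
--                 p += bound_check(m,r,c-1,rb,cb) # left
--                 p += bound_check(m,r+1,c,rb,cb) # right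
--     return p
--
-- def bound_check(m,r,c,rb,cb):
--     if (r >= 0 and c >= 0 and r < rb and c < cb) and m[r][c]:
--         # if we're in bounds and True, then don't Add to perim.
--         return 0
--     else:
--         # otherwise we are out of bounds OR in bounds and False.  Add.
--         return 1
-- ===== SOURCE B (Python) =====
-- def polygonPerimeter(m):
--     # perimeter = 4 * (# true cells) - 2 * (# adjacent true-true pairs),
--     # counting each shared edge once via right/down neighbors only.
--     cb = len(m[0])
--     rb = len(m)
--     p = 0
--     for r in range(rb):
--         for c in range(cb):
--             if m[r][c]:
--                 p += 4
--                 if c + 1 < cb and m[r][c + 1]: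
--                     p -= 2
--                 if r + 1 < rb and m[r + 1][c]:
--                     p -= 2
--     return p
-- ===== Notes on version B (the rewrite author's own statement) =====
-- stated objective: alternative
-- what changed: B replaces A's four bound_check helper calls per true cell with the identity perimeter = 4*(true cells) - 2*(adjacent true-true pairs), checking only the right and down neighbor of each true cell so each shared edge is counted exactly once.
import Mathlib
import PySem

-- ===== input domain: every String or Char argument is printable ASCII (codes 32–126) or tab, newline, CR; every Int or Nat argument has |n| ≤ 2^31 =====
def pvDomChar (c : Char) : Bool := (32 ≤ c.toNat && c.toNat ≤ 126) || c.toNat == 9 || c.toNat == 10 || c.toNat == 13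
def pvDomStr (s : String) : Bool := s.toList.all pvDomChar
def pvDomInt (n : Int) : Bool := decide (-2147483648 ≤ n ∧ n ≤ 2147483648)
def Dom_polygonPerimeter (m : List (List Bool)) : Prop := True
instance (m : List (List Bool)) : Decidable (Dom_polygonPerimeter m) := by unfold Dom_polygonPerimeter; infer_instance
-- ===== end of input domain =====

-- B replaces A's four bound_check calls per cell by the identity perimeter = 4*(true cells) - 2*(adjacent true pairs),
-- checking only the right and down neighbor of each true cell (objective: alternative, same cost).

-- ===== PORT A =====
-- bound_check(m, r, c, rb, cb)
def pvBoundCheck (m : List (List Bool)) (r c rb cb : Int) : Int :=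
  if (decide (0 ≤ r) && decide (0 ≤ c) && decide (r < rb) && decide (c < cb))
      && PySem.List.pyGetD (PySem.List.pyGetD m r []) c false then 0 else 1

def polygonPerimeter (m : List (List Bool)) : Int :=
  let rb : Int := m.length
  let cb : Int := (PySem.List.pyGetD m 0 []).length
  (PySem.List.pyRange 0 rb 1).foldl (fun p r =>
    (PySem.List.pyRange 0 cb 1).foldl (fun p c =>
      if PySem.List.pyGetD (PySem.List.pyGetD m r []) c false then
        p + pvBoundCheck m (r - 1) c rb cb + pvBoundCheck m r (c + 1) rb cb
          + pvBoundCheck m r (c - 1) rb cb + pvBoundCheck m (r + 1) c rb cb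
      else p) p) 0

-- ===== PORT B =====
def polygonPerimeter_alt (m : List (List Bool)) : Int :=
  let cb : Int := (PySem.List.pyGetD m 0 []).length
  let rb : Int := m.length
  (PySem.List.pyRange 0 rb 1).foldl (fun p r =>
    (PySem.List.pyRange 0 cb 1).foldl (fun p c =>
      if PySem.List.pyGetD (PySem.List.pyGetD m r []) c false then
        p + 4
          - (if decide (c + 1 < cb) && PySem.List.pyGetD (PySem.List.pyGetD m r []) (c + 1) false then 2 else 0)
          - (if decide (r + 1 < rb) && PySem.List.pyGetD (PySem.List.pyGetD m (r + 1) []) c false then 2 else 0)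
      else p) p) 0

-- ===== PRECONDITION & SPEC =====
-- Pre_ excludes exactly the inputs where Python A raises IndexError: the empty grid (m[0]) and
-- grids with some row shorter than row 0 (m[r][c] for c < len(m[0])).
def Pre_polygonPerimeter (m : List (List Bool)) : Prop :=
  m ≠ [] ∧ ∀ row ∈ m, (m.getD 0 []).length ≤ row.length
instance (m : List (List Bool)) : Decidable (Pre_polygonPerimeter m) := by
  unfold Pre_polygonPerimeter; infer_instance

def pvWitness_polygonPerimeter : List (List Bool) := [[true, false], [false, true]]

def Spec_polygonPerimeter (m : List (List Bool)) (out : Int) : Prop := out = polygonPerimeter_alt m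
instance (m : List (List Bool)) (out : Int) : Decidable (Spec_polygonPerimeter m out) := by
  unfold Spec_polygonPerimeter; infer_instance

-- ===== CLAIM (what is proved, stated in full; the proofs are below) =====
def Claim_equal_polygonPerimeter : Prop := ∀ (m : List (List Bool)), Dom_polygonPerimeter m → Pre_polygonPerimeter m → Spec_polygonPerimeter m (polygonPerimeter m)

-- ===== LEMMAS AND PROOFS =====

-- Nat-indexed view of a cell (out of range = false).
def pvCell (m : List (List Bool)) (r c : Nat) : Bool := (m.getD r []).getD c false

-- 0/1 indicators: true cell with a true neighbor up / down / left / right (in bounds).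
def pvCU (m : List (List Bool)) (r c : Nat) : Int :=
  if pvCell m r c = true ∧ 0 < r ∧ pvCell m (r - 1) c = true then 1 else 0
def pvCDn (m : List (List Bool)) (rbN r c : Nat) : Int :=
  if pvCell m r c = true ∧ r + 1 < rbN ∧ pvCell m (r + 1) c = true then 1 else 0
def pvCLf (m : List (List Bool)) (r c : Nat) : Int :=
  if pvCell m r c = true ∧ 0 < c ∧ pvCell m r (c - 1) = true then 1 else 0
def pvCRt (m : List (List Bool)) (cbN r c : Nat) : Int :=
  if pvCell m r c = true ∧ c + 1 < cbN ∧ pvCell m r (c + 1) = true then 1 else 0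

-- a guarded accumulating loop is init + a sum
theorem pv_foldl_sum {α : Type} (l : List α) (f : Int → α → Int) (g : α → Int)
    (h : ∀ p x, f p x = p + g x) (init : Int) :
    l.foldl f init = init + (l.map g).sum := by
  induction l generalizing init with
  | nil => simp
  | cons a t ih => simp only [List.foldl_cons, List.map_cons, List.sum_cons, h, ih]; ring

-- the shift argument: counting (i-1, i) true pairs equals counting (i, i+1) true pairs
theorem pv_shift (n : Nat) (T : Nat → Bool) :
    (∑ i ∈ Finset.range n, (if T i = true ∧ 0 < i ∧ T (i - 1) = true then (1 : Int) else 0))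
      = ∑ i ∈ Finset.range n, (if T i = true ∧ i + 1 < n ∧ T (i + 1) = true then (1 : Int) else 0) := by
  cases n with
  | zero => simp
  | succ k =>
    rw [Finset.sum_range_succ', Finset.sum_range_succ]
    simp only [Nat.lt_irrefl, false_and, and_false, if_false, add_zero,
      Nat.zero_lt_succ, Nat.add_sub_cancel, true_and]
    refine Finset.sum_congr rfl (fun i hi => ?_)
    have hik : i < k := Finset.mem_range.mp hi
    have h2 : i + 1 < k + 1 := by omega
    simp only [h2, true_and]
    exact if_congr (Iff.intro (fun ⟨a, b⟩ => ⟨b, a⟩) (fun ⟨a, b⟩ => ⟨b, a⟩)) rfl rfl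

theorem pv_sum_range (n : Nat) (g : Nat → Int) :
    ((List.range n).map g).sum = ∑ i ∈ Finset.range n, g i := by
  induction n with
  | zero => simp
  | succ k ih => rw [List.range_succ, Finset.sum_range_succ]; simp [ih]

theorem pv_sum_to_finset (n : Nat) (f : Int → Int) :
    ((PySem.List.pyRange 0 (n : Int) 1).map f).sum = ∑ i ∈ Finset.range n, f (i : Int) := by
  rw [PySem.List.pyRange_zero_nat, List.map_map]
  exact pv_sum_range n _

theorem pv_bc_up (m : List (List Bool)) (rbN cbN r c : Nat) (hr : r < rbN) (hc : c < cbN) :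
    pvBoundCheck m ((r : Int) - 1) (c : Int) (rbN : Int) (cbN : Int)
      = 1 - (if 0 < r ∧ pvCell m (r - 1) c = true then (1 : Int) else 0) := by
  unfold pvBoundCheck
  cases r with
  | zero => norm_num
  | succ k =>
    have h1 : ((k + 1 : Nat) : Int) - 1 = (k : Int) := by push_cast; ring
    rw [h1]
    simp only [PySem.List.pyGetD_natCast]
    have h2 : (k : Int) < (rbN : Int) := by exact_mod_cast Nat.lt_of_succ_lt hr
    have h3 : (c : Int) < (cbN : Int) := by exact_mod_cast hc
    simp [pvCell, h2, h3]
    split_ifs <;> ring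

theorem pv_bc_right (m : List (List Bool)) (rbN cbN r c : Nat) (hr : r < rbN) :
    pvBoundCheck m (r : Int) ((c : Int) + 1) (rbN : Int) (cbN : Int)
      = 1 - (if c + 1 < cbN ∧ pvCell m r (c + 1) = true then (1 : Int) else 0) := by
  unfold pvBoundCheck
  have h1 : ((c : Int) + 1) = ((c + 1 : Nat) : Int) := by push_cast; ring
  have h2 : (r : Int) < (rbN : Int) := by exact_mod_cast hr
  rw [h1]
  simp only [PySem.List.pyGetD_natCast, pvCell, Nat.cast_nonneg, decide_true, Bool.true_and]
  by_cases h3 : c + 1 < cbN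
  · have h3' : ((c + 1 : Nat) : Int) < (cbN : Int) := by exact_mod_cast h3
    simp only [h2, h3, h3', decide_true, Bool.true_and, true_and]
    split_ifs <;> ring
  · have h3' : ¬ ((c + 1 : Nat) : Int) < (cbN : Int) := by exact_mod_cast h3
    simp only [h3, h3', decide_false, false_and, if_false]
    norm_num

theorem pv_bc_left (m : List (List Bool)) (rbN cbN r c : Nat) (hr : r < rbN) (hc : c < cbN) :
    pvBoundCheck m (r : Int) ((c : Int) - 1) (rbN : Int) (cbN : Int)
      = 1 - (if 0 < c ∧ pvCell m r (c - 1) = true then (1 : Int) else 0) := by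
  unfold pvBoundCheck
  cases c with
  | zero => norm_num
  | succ k =>
    have h1 : ((k + 1 : Nat) : Int) - 1 = (k : Int) := by push_cast; ring
    rw [h1]
    simp only [PySem.List.pyGetD_natCast]
    have h2 : (r : Int) < (rbN : Int) := by exact_mod_cast hr
    have h3 : (k : Int) < (cbN : Int) := by exact_mod_cast Nat.lt_of_succ_lt hc
    simp [pvCell, h2, h3]
    split_ifs <;> ring

theorem pv_bc_down (m : List (List Bool)) (rbN cbN r c : Nat) (hc : c < cbN) :
    pvBoundCheck m ((r : Int) + 1) (c : Int) (rbN : Int) (cbN : Int)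
      = 1 - (if r + 1 < rbN ∧ pvCell m (r + 1) c = true then (1 : Int) else 0) := by
  unfold pvBoundCheck
  have h1 : ((r : Int) + 1) = ((r + 1 : Nat) : Int) := by push_cast; ring
  have h2 : (c : Int) < (cbN : Int) := by exact_mod_cast hc
  rw [h1]
  simp only [PySem.List.pyGetD_natCast, pvCell, Nat.cast_nonneg, decide_true, Bool.true_and]
  by_cases h3 : r + 1 < rbN
  · have h3' : ((r + 1 : Nat) : Int) < (rbN : Int) := by exact_mod_cast h3
    simp only [h2, h3, h3', decide_true, Bool.true_and, true_and]
    split_ifs <;> ring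
  · have h3' : ¬ ((r + 1 : Nat) : Int) < (rbN : Int) := by exact_mod_cast h3
    simp only [h3, h3', decide_false, Bool.false_and, false_and, if_false]
    norm_num

theorem pv_A_sum (m : List (List Bool)) :
    polygonPerimeter m
      = ∑ r ∈ Finset.range m.length, ∑ c ∈ Finset.range (m.getD 0 []).length,
          ((if pvCell m r c then (4 : Int) else 0)
            - pvCU m r c - pvCRt m (m.getD 0 []).length r c
            - pvCLf m r c - pvCDn m m.length r c) := by
  unfold polygonPerimeter
  rw [PySem.List.pyGetD_zero]
  rw [pv_foldl_sum _ _
      (fun r => ((PySem.List.pyRange 0 ((m.getD 0 []).length : Int) 1).map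
        (fun c => if PySem.List.pyGetD (PySem.List.pyGetD m r []) c false then
            pvBoundCheck m (r - 1) c (m.length : Int) ((m.getD 0 []).length : Int)
              + pvBoundCheck m r (c + 1) (m.length : Int) ((m.getD 0 []).length : Int)
              + pvBoundCheck m r (c - 1) (m.length : Int) ((m.getD 0 []).length : Int)
              + pvBoundCheck m (r + 1) c (m.length : Int) ((m.getD 0 []).length : Int)
          else 0)).sum)
      (fun p r => pv_foldl_sum _ _ _ (fun q c => by split_ifs <;> ring) p) 0]
  rw [zero_add, pv_sum_to_finset]
  refine Finset.sum_congr rfl (fun r hr => ?_)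
  rw [pv_sum_to_finset]
  refine Finset.sum_congr rfl (fun c hc => ?_)
  have hrn : r < m.length := Finset.mem_range.mp hr
  have hcn : c < (m.getD 0 []).length := Finset.mem_range.mp hc
  have hcell : PySem.List.pyGetD (PySem.List.pyGetD m (r : Int) []) (c : Int) false
      = pvCell m r c := by simp [pvCell, PySem.List.pyGetD_natCast]
  rw [hcell, pv_bc_up m _ _ r c hrn hcn, pv_bc_right m _ _ r c hrn,
    pv_bc_left m _ _ r c hrn hcn, pv_bc_down m _ _ r c hcn]
  by_cases h : pvCell m r c = true
  · simp only [pvCU, pvCDn, pvCLf, pvCRt, h, if_true, true_and]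
    ring
  · simp [pvCU, pvCDn, pvCLf, pvCRt, h]

theorem pv_B_sum (m : List (List Bool)) :
    polygonPerimeter_alt m
      = ∑ r ∈ Finset.range m.length, ∑ c ∈ Finset.range (m.getD 0 []).length,
          ((if pvCell m r c then (4 : Int) else 0)
            - 2 * pvCRt m (m.getD 0 []).length r c - 2 * pvCDn m m.length r c) := by
  unfold polygonPerimeter_alt
  rw [PySem.List.pyGetD_zero]
  rw [pv_foldl_sum _ _
      (fun r => ((PySem.List.pyRange 0 ((m.getD 0 []).length : Int) 1).map
        (fun c => if PySem.List.pyGetD (PySem.List.pyGetD m r []) c false then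
            (4 : Int)
              - (if decide (c + 1 < ((m.getD 0 []).length : Int))
                    && PySem.List.pyGetD (PySem.List.pyGetD m r []) (c + 1) false then 2 else 0)
              - (if decide (r + 1 < (m.length : Int))
                    && PySem.List.pyGetD (PySem.List.pyGetD m (r + 1) []) c false then 2 else 0)
          else 0)).sum)
      (fun p r => pv_foldl_sum _ _ _ (fun q c => by split_ifs <;> ring) p) 0]
  rw [zero_add, pv_sum_to_finset]
  refine Finset.sum_congr rfl (fun r hr => ?_)
  rw [pv_sum_to_finset]
  refine Finset.sum_congr rfl (fun c hc => ?_)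
  have hrn : r < m.length := Finset.mem_range.mp hr
  have hcn : c < (m.getD 0 []).length := Finset.mem_range.mp hc
  have hcell : PySem.List.pyGetD (PySem.List.pyGetD m (r : Int) []) (c : Int) false
      = pvCell m r c := by simp [pvCell, PySem.List.pyGetD_natCast]
  have hrt : (if decide ((c : Int) + 1 < ((m.getD 0 []).length : Int))
        && PySem.List.pyGetD (PySem.List.pyGetD m (r : Int) []) ((c : Int) + 1) false then (2 : Int) else 0)
      = 2 * (if c + 1 < (m.getD 0 []).length ∧ pvCell m r (c + 1) = true then (1 : Int) else 0) := by
    have h1 : ((c : Int) + 1) = ((c + 1 : Nat) : Int) := by push_cast; ring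
    rw [h1]
    simp only [PySem.List.pyGetD_natCast, pvCell]
    by_cases h3 : c + 1 < (m.getD 0 []).length
    · have h3' : ((c + 1 : Nat) : Int) < ((m.getD 0 []).length : Int) := by exact_mod_cast h3
      simp only [h3, h3', decide_true, Bool.true_and, true_and]
      split_ifs <;> ring
    · have h3' : ¬ ((c + 1 : Nat) : Int) < ((m.getD 0 []).length : Int) := by exact_mod_cast h3
      simp only [h3, h3', decide_false, Bool.false_and, false_and, if_false]
      norm_num
  have hdn : (if decide ((r : Int) + 1 < (m.length : Int))
        && PySem.List.pyGetD (PySem.List.pyGetD m ((r : Int) + 1) []) (c : Int) false then (2 : Int) else 0)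
      = 2 * (if r + 1 < m.length ∧ pvCell m (r + 1) c = true then (1 : Int) else 0) := by
    have h1 : ((r : Int) + 1) = ((r + 1 : Nat) : Int) := by push_cast; ring
    rw [h1]
    simp only [PySem.List.pyGetD_natCast, pvCell]
    by_cases h3 : r + 1 < m.length
    · have h3' : ((r + 1 : Nat) : Int) < (m.length : Int) := by exact_mod_cast h3
      simp only [h3, h3', decide_true, Bool.true_and, true_and]
      split_ifs <;> ring
    · have h3' : ¬ ((r + 1 : Nat) : Int) < (m.length : Int) := by exact_mod_cast h3
      simp only [h3, h3', decide_false, Bool.false_and, false_and, if_false]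
      norm_num
  rw [hcell, hrt, hdn]
  by_cases h : pvCell m r c = true
  · simp only [pvCRt, pvCDn, h, if_true, true_and]
  · simp [pvCRt, pvCDn, h]

-- the two neighbor-pair counts agree after shifting the index by one (rows and columns)
theorem pv_left_eq_right (m : List (List Bool)) (cbN : Nat) (r : Nat) :
    (∑ c ∈ Finset.range cbN, pvCLf m r c) = ∑ c ∈ Finset.range cbN, pvCRt m cbN r c := by
  simpa [pvCLf, pvCRt] using pv_shift cbN (fun c => pvCell m r c)

theorem pv_up_eq_down (m : List (List Bool)) (rbN cbN : Nat) :
    (∑ r ∈ Finset.range rbN, ∑ c ∈ Finset.range cbN, pvCU m r c)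
      = ∑ r ∈ Finset.range rbN, ∑ c ∈ Finset.range cbN, pvCDn m rbN r c := by
  rw [Finset.sum_comm, Finset.sum_comm (s := Finset.range rbN)]
  refine Finset.sum_congr rfl (fun c _ => ?_)
  simpa [pvCU, pvCDn] using pv_shift rbN (fun r => pvCell m r c)

-- ===== VERDICT (by name: the statement is the Claim_ definition above) =====
theorem polygonPerimeter_spec : Claim_equal_polygonPerimeter := by
  intro m _ _
  unfold Spec_polygonPerimeter
  rw [pv_A_sum, pv_B_sum]
  simp only [Finset.sum_sub_distrib]
  have h1 := pv_up_eq_down m m.length (m.getD 0 []).length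
  have h2 : (∑ r ∈ Finset.range m.length, ∑ c ∈ Finset.range (m.getD 0 []).length, pvCLf m r c)
      = ∑ r ∈ Finset.range m.length, ∑ c ∈ Finset.range (m.getD 0 []).length,
          pvCRt m (m.getD 0 []).length r c :=
    Finset.sum_congr rfl (fun r _ => pv_left_eq_right m _ r)
  have h3 : ∀ (f : Nat → Nat → Int),
      (∑ r ∈ Finset.range m.length, ∑ c ∈ Finset.range (m.getD 0 []).length, 2 * f r c)
        = 2 * ∑ r ∈ Finset.range m.length, ∑ c ∈ Finset.range (m.getD 0 []).length, f r c := by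
    intro f; rw [Finset.mul_sum]; exact Finset.sum_congr rfl (fun r _ => by rw [Finset.mul_sum])
  rw [h3, h3]
  omega
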